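-- pv_equiv track=rewrite | github.com/dt-woods/vorthos-mine | content/code/unit_test_mml.py | get_preceding_word
-- ===== SOURCE A (Python) =====
-- def get_preceding_word(text, index):
--     """
--     Returns the word that immediately precedes the given index in a string.
--     The function looks backward from the index until it encounters a space,
--     a newline character, or the beginning of the string.
--
--     Args:
--         text: The input string.
--         index: The index in the string from which to start looking backward.
--
--     Returns:
--         The word immediately preceding the index. Returns an empty string
--         if no word is found (e.g., at the beginning of the string or
--         immediately after a space/newline).
--     """
--     if not (0 <= index <= len(text)):
--         raise IndexError("Index out of bounds for the given text.")
--
--     # Start looking backward from the character *before* the given index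
--     # If index is 0, there's no preceding word.
--     if index == 0:
--         return ""
--
--     end_of_word_search = index
--
--     # Find the start of the word
--     start_of_word_search = end_of_word_search - 1
--     while start_of_word_search >= 0:
--         char = text[start_of_word_search]
--         if char == ' ' or char == '\n':
--             break # Found a space or newline, so the word starts after this
--         start_of_word_search -= 1
--
--     # Adjust start_of_word_search to be the first character of the word
--     # If the loop broke because of a space/newline, increment by 1
--     # If the loop reached -1 (start of string), then 0 is the start of the word
--     word_start = start_of_word_search + 1
--
--     # Extract the word
--     word = text[word_start:end_of_word_search]
--
--     return word
-- ===== SOURCE B (Python) =====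
-- def get_preceding_word(text, index):
--     """Prefix-slice decomposition: take text[:index], normalise newlines to
--     spaces, and return the segment after the last space via rsplit."""
--     if not (0 <= index <= len(text)):
--         raise IndexError("Index out of bounds for the given text.")
--     prefix = text[:index]
--     return prefix.replace('\n', ' ').rsplit(' ', 1)[-1]
-- ===== Notes on version B (the rewrite author's own statement) =====
-- stated objective: idiomatic
-- what changed: Replaces A's explicit backward character-by-character index scan with a prefix slice text[:index] followed by replace('\n',' ') and rsplit(' ',1)[-1], i.e. slice-normalise-split instead of a hand-written loop.
import Mathlib
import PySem

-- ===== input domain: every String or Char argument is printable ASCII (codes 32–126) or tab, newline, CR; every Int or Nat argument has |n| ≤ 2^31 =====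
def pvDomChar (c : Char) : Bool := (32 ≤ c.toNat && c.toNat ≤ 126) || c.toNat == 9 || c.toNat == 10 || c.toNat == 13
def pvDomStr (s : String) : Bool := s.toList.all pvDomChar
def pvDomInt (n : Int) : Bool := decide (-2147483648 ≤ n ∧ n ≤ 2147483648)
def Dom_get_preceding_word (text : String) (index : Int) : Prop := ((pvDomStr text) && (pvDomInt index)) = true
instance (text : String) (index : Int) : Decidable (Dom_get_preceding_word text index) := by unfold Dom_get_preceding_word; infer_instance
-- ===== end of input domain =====

-- B replaces A's backward character scan by a prefix-slice + replace + rsplit decomposition (objective: idiomatic).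

-- ===== PORT A =====
-- A's while loop: start := index-1; while start ≥ 0: break on ' '/'\n' else start -= 1.
-- Recursion on k = start+1 (number of indices still to inspect); result is A's final `start_of_word_search`.
def pvFindStart (cs : List Char) : Nat → Int
  | 0 => -1
  | k+1 =>
    match cs[k]? with
    | some c => if c = ' ' ∨ c = '\n' then (k : Int) else pvFindStart cs k
    | none => pvFindStart cs k   -- unreachable: the loop only reads indices < index ≤ len(text)

def get_preceding_word (text : String) (index : Int) : String :=
  if ¬(0 ≤ index ∧ index ≤ (text.toList.length : Int)) then ""  -- Python raises IndexError here; excluded by Pre_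
  else if index = 0 then ""
  else
    let start := pvFindStart text.toList index.toNat
    String.ofList (PySem.List.slice text.toList (some (start + 1)) (some index))

-- ===== PORT B =====
def get_preceding_word_alt (text : String) (index : Int) : String :=
  if ¬(0 ≤ index ∧ index ≤ (text.toList.length : Int)) then ""  -- raise IndexError; excluded by Pre_
  else
    let pre := PySem.List.slice text.toList none (some index)           -- text[:index]
    let t := pre.map (fun c => if c = '\n' then ' ' else c)             -- .replace('\n',' '): single-char replace is an elementwise map (exact)
    String.ofList ((t.reverse.takeWhile (fun c => c ≠ ' ')).reverse)        -- .rsplit(' ', 1)[-1]: the segment after the last ' ' (exact)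

-- ===== PRECONDITION & SPEC =====
-- Pre_ excludes exactly the inputs where A raises IndexError (index out of 0..len(text)); B raises there too.
def Pre_get_preceding_word (text : String) (index : Int) : Prop :=
  0 ≤ index ∧ index ≤ (text.toList.length : Int)
instance (text : String) (index : Int) : Decidable (Pre_get_preceding_word text index) := by
  unfold Pre_get_preceding_word; infer_instance

def pvWitness_get_preceding_word : String × Int := ("hello world", 11)

def Spec_get_preceding_word (text : String) (index : Int) (out : String) : Prop := out = get_preceding_word_alt text index
instance (text : String) (index : Int) (out : String) : Decidable (Spec_get_preceding_word text index out) := by unfold Spec_get_preceding_word; infer_instance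

-- ===== CLAIM (what is proved, stated in full; the proofs are below) =====
def Claim_equal_get_preceding_word : Prop := ∀ (text : String) (index : Int), Dom_get_preceding_word text index → Pre_get_preceding_word text index → Spec_get_preceding_word text index (get_preceding_word text index)

-- ===== LEMMAS AND PROOFS =====

-- The character test of A's loop, as one Bool (true = keep scanning / keep the character).
def pvKeep (c : Char) : Bool := !(c = ' ' || c = '\n')

-- A's loop variable stays in [-1, k).
theorem pvFindStart_bounds (cs : List Char) (k : Nat) :
    -1 ≤ pvFindStart cs k ∧ pvFindStart cs k < k := by
  induction k with
  | zero => simp [pvFindStart]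
  | succ k ih =>
    unfold pvFindStart
    cases h : cs[k]? with
    | none =>
      dsimp only
      exact ⟨ih.1, by have := ih.2; omega⟩
    | some c =>
      by_cases hc : c = ' ' ∨ c = '\n'
      · simp only [hc, if_true]; constructor <;> omega
      · simp only [hc, if_false]; exact ⟨ih.1, by have := ih.2; omega⟩

-- The loop only reads indices < k, so a longer list with the same first k entries gives the same result.
theorem pvFindStart_append (q : List Char) (c : Char) (k : Nat) (hk : k ≤ q.length) :
    pvFindStart (q ++ [c]) k = pvFindStart q k := by
  induction k with
  | zero => rfl
  | succ k ih =>
    unfold pvFindStart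
    rw [List.getElem?_append_left (by omega), ih (by omega)]

theorem pvFindStart_take (cs : List Char) (n : Nat) (k : Nat) (hk : k ≤ n) :
    pvFindStart (cs.take n) k = pvFindStart cs k := by
  induction k with
  | zero => rfl
  | succ k ih =>
    unfold pvFindStart
    rw [List.getElem?_take_of_lt (by omega), ih (by omega)]

-- Core: A's slice of the prefix is the trailing run of non-delimiter characters of the prefix.
theorem pvCore (p : List Char) :
    p.drop (pvFindStart p p.length + 1).toNat = (p.reverse.takeWhile pvKeep).reverse := by
  induction p using List.reverseRecOn with
  | nil => simp [pvFindStart]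
  | append_singleton q c ih =>
    have hlen : (q ++ [c]).length = q.length + 1 := by simp
    rw [hlen]
    unfold pvFindStart
    rw [List.getElem?_concat_length]
    by_cases hc : c = ' ' ∨ c = '\n'
    · simp only [hc, if_true]
      have h1 : ((q.length : Int) + 1).toNat = (q ++ [c]).length := by simp
      rw [h1, List.drop_length]
      rcases hc with h | h <;> simp [pvKeep, h]
    · simp only [hc, if_false]
      rw [pvFindStart_append q c q.length le_rfl]
      have hb := pvFindStart_bounds q q.length
      have hle : (pvFindStart q q.length + 1).toNat ≤ q.length := by omega
      rw [List.drop_append_of_le_length hle]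
      push Not at hc
      simp [pvKeep, hc.1, hc.2, ih]

-- B's newline→space map acts as the identity on the kept trailing run.
theorem pvMapId (p : List Char) :
    (p.takeWhile pvKeep).map (fun c => if c = '\n' then ' ' else c) = p.takeWhile pvKeep := by
  induction p with
  | nil => rfl
  | cons a l ih =>
    by_cases ha : a = ' ' ∨ a = '\n'
    · rcases ha with h | h <;> simp [pvKeep, h]
    · push Not at ha
      simp [pvKeep, ha.1, ha.2, ih]

-- B's replace + takeWhile over the mapped list equals the single takeWhile over the original prefix.
theorem pvMapSide (p : List Char) :
    ((p.map (fun c => if c = '\n' then ' ' else c)).takeWhile (fun c => c ≠ ' '))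
      = p.takeWhile pvKeep := by
  rw [List.takeWhile_map]
  have hpred : ((fun c : Char => decide (c ≠ ' ')) ∘ (fun c => if c = '\n' then ' ' else c))
      = pvKeep := by
    funext c
    by_cases h : c = '\n' <;> simp [pvKeep, h]
  rw [hpred, pvMapId]

-- ===== VERDICT (by name: the statement is the Claim_ definition above) =====
theorem get_preceding_word_spec : Claim_equal_get_preceding_word := by
  intro text index _ hpre
  unfold Spec_get_preceding_word get_preceding_word get_preceding_word_alt
  obtain ⟨h0, hle⟩ := hpre
  have hcond : ¬¬(0 ≤ index ∧ index ≤ (text.toList.length : Int)) := not_not_intro ⟨h0, hle⟩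
  simp only [if_neg hcond]
  obtain ⟨n, rfl⟩ : ∃ n : Nat, index = (n : Int) := ⟨index.toNat, by omega⟩
  have hn : n ≤ text.toList.length := by exact_mod_cast hle
  by_cases hz : (n : Int) = 0
  · obtain rfl : n = 0 := by exact_mod_cast hz
    rw [if_pos hz, PySem.List.slice_to_natCast]
    simp
  · rw [if_neg hz]
    simp only [Int.toNat_natCast, PySem.List.slice_to_natCast]
    have hplen : (text.toList.take n).length = n := by rw [List.length_take]; omega
    have hbnd := pvFindStart_bounds text.toList n
    have hcast : pvFindStart text.toList n + 1
        = (((pvFindStart text.toList n + 1).toNat : Nat) : Int) := by omega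
    rw [hcast, PySem.List.slice_natCast, ← List.drop_take]
    have key := pvCore (text.toList.take n)
    rw [hplen, pvFindStart_take text.toList n n le_rfl] at key
    rw [key, ← List.map_reverse, pvMapSide]
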